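-- pv_equiv track=rewrite | github.com/Ago-aka-pasta-boy/Basics-of-Mobile-Robotics | Global_navigation/global_path.py | obtain_list_sides
-- ===== SOURCE A (Python) =====
-- def obtain_list_sides(list_vertices):
--     """
--     Given the list of obstacle vertices sorted by obstacle,
--     this function returns the list of obstacle sides sorted by obstacle.
--
--     Inputs: list_vertices as in find_all_paths
--
--     Outputs: list_sides = [[obstacle_1.sides], [obstacle_2.sides], ...]
--     where obstacle_k.sides = [(name_vertex1, name_vertex2), ..., (name_vertexV, name_vertex1)]
--     """
--
--
--     #step 1: obtain the number of sides of each obstacle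
--     length_obstacles = [len(obstacle) for obstacle in list_vertices]
--
--     #step 2: convert indexing of vertices from [0][0],[0][1],... into 1,2,3,...,N
--     #by introducing a shift (0 and N+1 are start and goal respectively)
--
--     #then enter every tuple (side.vertex1, side.vertex2) into sides_obstacle
--     #then enter sides_obstacle into list_sides
--     list_sides = []
--     for obstacle in range(len(list_vertices)):
--         sides_obstacle = []                             #list of sides of current obstacle
--
--         shift = sum(length_obstacles[0:obstacle]) + 1   #to convert indexing
--         nb_sides = length_obstacles[obstacle]
--         for vertex in range(nb_sides):
--             side = (shift + vertex,\
--                     shift + ((vertex+1) % nb_sides))    #use of % to count 1,2,1 instead of 1,2,3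
--             sides_obstacle.append(side)
--
--         list_sides.append(sides_obstacle)               #total list of sides, grouped by obstacle
--
--     return list_sides
-- ===== SOURCE B (Python) =====
-- def obtain_list_sides(list_vertices):
--     list_sides = []
--     shift = 1
--     for obstacle in list_vertices:
--         n = len(obstacle)
--         sides = [(shift + v, shift + (v + 1) % n) for v in range(n)]
--         list_sides.append(sides)
--         shift += n
--     return list_sides
-- ===== Notes on version B (the rewrite author's own statement) =====
-- stated objective: simpler
-- what changed: B keeps a running cumulative shift while iterating over the obstacles themselves, instead of indexing by position and re-summing the prefix of a separate lengths list for every obstacle.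
import Mathlib
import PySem

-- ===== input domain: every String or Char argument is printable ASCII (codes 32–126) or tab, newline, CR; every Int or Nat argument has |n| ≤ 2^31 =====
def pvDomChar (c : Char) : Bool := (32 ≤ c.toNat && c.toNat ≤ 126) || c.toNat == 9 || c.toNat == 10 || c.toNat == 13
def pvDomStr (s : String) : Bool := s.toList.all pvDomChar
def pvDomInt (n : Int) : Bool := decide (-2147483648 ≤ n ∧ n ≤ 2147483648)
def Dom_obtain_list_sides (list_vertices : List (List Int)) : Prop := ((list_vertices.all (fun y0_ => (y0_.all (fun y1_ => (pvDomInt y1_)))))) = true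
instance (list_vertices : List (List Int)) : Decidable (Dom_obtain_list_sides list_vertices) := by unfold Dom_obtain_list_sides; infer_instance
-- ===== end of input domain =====

-- B keeps one running cumulative shift over the obstacles instead of re-summing the length prefix per obstacle (objective: simpler).

-- ===== PORT A =====
-- literal port of A: per obstacle index, shift = sum(length_obstacles[0:obstacle]) + 1,
-- then an inner append loop over range(nb_sides).
-- lengths[obstacle] is ported with pyGetD (the index is always in range in A's loop).
def obtain_list_sides (list_vertices : List (List Int)) : List (List (Int × Int)) :=
  let length_obstacles := list_vertices.map (fun obstacle => (obstacle.length : Int))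
  (PySem.List.pyRange 0 (list_vertices.length : Int) 1).foldl (fun list_sides obstacle =>
    let shift := (PySem.List.slice length_obstacles (some 0) (some obstacle)).sum + 1
    let nb_sides := PySem.List.pyGetD length_obstacles obstacle 0
    let sides_obstacle := (PySem.List.pyRange 0 nb_sides 1).foldl
      (fun s vertex => s ++ [(shift + vertex, shift + PySem.Int.mod (vertex + 1) nb_sides)]) []
    list_sides ++ [sides_obstacle]) []

-- ===== PORT B =====
-- literal port of B: one fold over the obstacles, state = (list_sides, running shift);
-- the list comprehension is the map over range(n).
def obtain_list_sides_alt (list_vertices : List (List Int)) : List (List (Int × Int)) :=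
  (list_vertices.foldl (fun (st : List (List (Int × Int)) × Int) obstacle =>
      let n : Int := (obstacle.length : Int)
      let sides := (PySem.List.pyRange 0 n 1).map
        (fun v => (st.2 + v, st.2 + PySem.Int.mod (v + 1) n))
      (st.1 ++ [sides], st.2 + n)) ([], 1)).1

-- ===== PRECONDITION & SPEC =====
def Spec_obtain_list_sides (list_vertices : List (List Int)) (out : List (List (Int × Int))) : Prop := out = obtain_list_sides_alt list_vertices
instance (list_vertices : List (List Int)) (out : List (List (Int × Int))) : Decidable (Spec_obtain_list_sides list_vertices out) := by unfold Spec_obtain_list_sides; infer_instance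

-- ===== CLAIM (what is proved, stated in full; the proofs are below) =====
def Claim_equal_obtain_list_sides : Prop := ∀ (list_vertices : List (List Int)), Dom_obtain_list_sides list_vertices → Spec_obtain_list_sides list_vertices (obtain_list_sides list_vertices)

-- ===== LEMMAS AND PROOFS =====

/-- the sides of one obstacle with `n` vertices, starting at global index `s` -/
def sidesOf (s n : Int) : List (Int × Int) :=
  (PySem.List.pyRange 0 n 1).map (fun v => (s + v, s + PySem.Int.mod (v + 1) n))

/-- the common mathematical shape of both programs: fold with a running shift -/
def chain : List (List Int) → Int → List (List (Int × Int))
  | [], _ => []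
  | o :: rest, s => sidesOf s (o.length : Int) :: chain rest (s + o.length)

lemma B_eq_chain (lv : List (List Int)) (acc : List (List (Int × Int))) (s : Int) :
    (lv.foldl (fun (st : List (List (Int × Int)) × Int) obstacle =>
      (st.1 ++ [(PySem.List.pyRange 0 (obstacle.length : Int) 1).map
        (fun v => (st.2 + v, st.2 + PySem.Int.mod (v + 1) (obstacle.length : Int)))],
       st.2 + (obstacle.length : Int))) (acc, s)).1 = acc ++ chain lv s := by
  induction lv generalizing acc s with
  | nil => simp [chain]
  | cons o rest ih => simp [List.foldl_cons, ih, chain, sidesOf]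

lemma A_eq_chain (lv : List (List Int)) (s : Int) :
    (List.range lv.length).map (fun k =>
      sidesOf (s + ((lv.map (fun o => (o.length : Int))).take k).sum)
        (PySem.List.pyGetD (lv.map (fun o => (o.length : Int))) (k : Int) 0))
    = chain lv s := by
  induction lv generalizing s with
  | nil => simp [chain]
  | cons o rest ih =>
    simp only [List.length_cons, List.range_succ_eq_map, List.map_cons, List.map_map]
    rw [chain]
    congr 1
    · simp
    · rw [← ih (s + (o.length : Int))]
      apply List.map_congr_left
      intro k _
      simp only [Function.comp]
      have hc : ((Nat.succ k : Nat) : Int) = ((k : Nat) : Int) + 1 := by push_cast; ring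
      simp only [Nat.succ_eq_add_one] at hc ⊢
      rw [show ((k + 1 : Nat) : Int) = ((k : Nat) : Int) + 1 from hc]
      congr 1
      · simp only [List.take_succ_cons, List.sum_cons]; ring
      · rw [← hc, PySem.List.pyGetD_natCast, PySem.List.pyGetD_natCast]
        simp

-- ===== VERDICT (by name: the statement is the Claim_ definition above) =====
theorem obtain_list_sides_spec : Claim_equal_obtain_list_sides := by
  intro lv _
  unfold Spec_obtain_list_sides obtain_list_sides obtain_list_sides_alt
  rw [B_eq_chain lv [] 1, List.nil_append, ← A_eq_chain lv 1]
  simp only [PySem.List.foldl_append_singleton_eq_map, List.nil_append]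
  rw [PySem.List.pyRange_zero_nat, List.map_map]
  apply List.map_congr_left
  intro k _
  simp only [Function.comp]
  rw [PySem.List.slice_toNat _ le_rfl (Int.natCast_nonneg k)]
  simp [sidesOf]
  intro a _ _
  ring
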